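-- pv_equiv track=rewrite | github.com/jackpires11/Projects | Graphic Design/Modelling/Crochet Visualisation/2dcrochet.py | row_Parser
-- ===== SOURCE A (Python) =====
-- def row_Parser(pattern):
--         new_pattern = ''
--         current_row = ''
--         for symbol in pattern:
--                 if symbol != str('\n'):
--                         current_row += symbol
--                 else:
--                         new_pattern += current_row[::-1] + '\n'
--                         current_row = ''
--         return(new_pattern)
-- ===== SOURCE B (Python) =====
-- def row_Parser(pattern):
--     parts = pattern.split('\n')
--     return ''.join(p[::-1] + '\n' for p in parts[:-1])
-- ===== Notes on version B (the rewrite author's own statement) =====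
-- stated objective: faster
-- what changed: Replaces the character-by-character accumulator scan with repeated string concatenation by a single split on newline, reversing each terminated line and joining the results in one pass.
import Mathlib
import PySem

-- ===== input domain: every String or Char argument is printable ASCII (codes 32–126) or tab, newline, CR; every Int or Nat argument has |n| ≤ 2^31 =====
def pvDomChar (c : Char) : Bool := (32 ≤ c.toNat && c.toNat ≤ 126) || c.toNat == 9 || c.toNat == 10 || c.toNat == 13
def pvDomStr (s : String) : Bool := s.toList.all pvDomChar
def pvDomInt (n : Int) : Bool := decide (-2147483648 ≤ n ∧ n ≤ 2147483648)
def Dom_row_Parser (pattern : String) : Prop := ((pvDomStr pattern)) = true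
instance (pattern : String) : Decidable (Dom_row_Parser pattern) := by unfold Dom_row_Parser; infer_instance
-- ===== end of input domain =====

-- B replaces A's character-by-character accumulator scan with split-on-newline,
-- reverse each terminated line, rejoin (objective: faster; measured).

-- ===== PORT A =====
-- state = (new_pattern, current_row), both as char lists; one step of A's loop body
def rowParserStep (st : List Char × List Char) (symbol : Char) : List Char × List Char :=
  if symbol ≠ '\n' then (st.1, st.2 ++ [symbol])
  else (st.1 ++ st.2.reverse ++ ['\n'], [])

def row_Parser (pattern : String) : String :=
  String.ofList (pattern.toList.foldl rowParserStep ([], [])).1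

-- ===== PORT B =====
def row_Parser_alt (pattern : String) : String :=
  let parts := pattern.toList.splitOn '\n'
  String.ofList ((PySem.List.slice parts none (some (-1))).map
    (fun p => p.reverse ++ ['\n'])).flatten

-- ===== PRECONDITION & SPEC =====
def Spec_row_Parser (pattern : String) (out : String) : Prop := out = row_Parser_alt pattern
instance (pattern : String) (out : String) : Decidable (Spec_row_Parser pattern out) := by unfold Spec_row_Parser; infer_instance

-- ===== CLAIM (what is proved, stated in full; the proofs are below) =====
def Claim_equal_row_Parser : Prop := ∀ (pattern : String), Dom_row_Parser pattern → Spec_row_Parser pattern (row_Parser pattern)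

-- ===== LEMMAS AND PROOFS =====

theorem rowParser_fold_eq (l : List Char) (np cur : List Char) (hcur : '\n' ∉ cur) :
    (l.foldl rowParserStep (np, cur)).1 =
      np ++ (((cur ++ l).splitOnP (· == '\n')).dropLast.map
        (fun p => p.reverse ++ ['\n'])).flatten := by
  induction l generalizing np cur with
  | nil =>
    simp [List.splitOnP_eq_single (· == '\n') cur
      (by intro x hx hpx; exact hcur (by simpa using (beq_iff_eq.mp hpx ▸ hx)))]
  | cons c l ih =>
    by_cases hc : c = '\n'
    · subst hc
      rw [List.foldl_cons]
      have hstep : rowParserStep (np, cur) '\n' = (np ++ cur.reverse ++ ['\n'], []) := by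
        simp [rowParserStep]
      rw [hstep, ih _ _ (by simp)]
      have hx : ∀ x ∈ cur, ¬((x == '\n') = true) := by
        intro x hx hpx; exact hcur (by simpa using (beq_iff_eq.mp hpx ▸ hx))
      simp only [List.nil_append]
      rw [List.splitOnP_first (· == '\n') cur hx '\n' (by simp) l]
      have hne : ((l).splitOnP (· == '\n')) ≠ [] := List.splitOnP_ne_nil _ _
      rw [List.dropLast_cons_of_ne_nil hne]
      simp
    · rw [List.foldl_cons]
      have hstep : rowParserStep (np, cur) c = (np, cur ++ [c]) := by
        simp [rowParserStep, hc]
      rw [hstep, ih _ _ (by simp [hcur, Ne.symm hc])]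
      simp

-- ===== VERDICT (by name: the statement is the Claim_ definition above) =====
theorem row_Parser_spec : Claim_equal_row_Parser := by
  intro pattern _
  unfold Spec_row_Parser row_Parser row_Parser_alt
  rw [rowParser_fold_eq pattern.toList [] [] (by simp)]
  simp [PySem.List.slice_to_neg_one, List.splitOn]
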